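-- pv_equiv track=rewrite | github.com/saorsa-labs/fae | scripts/mlx_benchmark.py | build_filler_text
-- ===== SOURCE A (Python) =====
-- def build_filler_text(target_words: int) -> str:
--     """Generate filler text of approximately `target_words` words."""
--     sentences = [
--         "The history of artificial intelligence is a fascinating journey through decades of research and development.",
--         "Machine learning algorithms have transformed how we process and understand data across many industries.",
--         "Neural networks inspired by biological systems have become the foundation of modern deep learning approaches.",
--         "Natural language processing enables computers to understand and generate human language with increasing accuracy.",
--         "Computer vision systems can now identify objects and faces with superhuman performance in many benchmarks.",
--         "Reinforcement learning has achieved remarkable results in game playing and robotics applications worldwide.",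
--         "The ethical implications of artificial intelligence deployment require careful consideration and governance frameworks.",
--         "Transfer learning allows models trained on one task to be adapted efficiently for related problems and domains.",
--         "Generative models can create realistic images text and audio that are increasingly difficult to distinguish from human work.",
--         "Edge computing brings machine learning inference closer to data sources reducing latency and improving privacy.",
--         "Federated learning enables training models across distributed devices without centralizing sensitive personal data.",
--         "Quantum computing promises to accelerate certain machine learning algorithms exponentially in the coming decades.",
--         "Autonomous vehicles rely on a combination of sensors machine learning and real time decision making systems.",
--         "Healthcare applications of AI include medical image analysis drug discovery and personalized treatment planning.",
--         "Climate modeling and environmental monitoring benefit from advanced machine learning prediction capabilities.",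
--         "Robotics and automation continue to evolve with improved perception planning and manipulation abilities.",
--         "The democratization of AI tools has made machine learning accessible to developers without specialized training.",
--         "Large language models have demonstrated emergent capabilities that were not explicitly programmed or expected.",
--         "Data privacy regulations like GDPR impact how machine learning systems collect process and store information.",
--         "The computational costs of training large models raise questions about environmental sustainability and access.",
--     ]
--     text = ""
--     idx = 0
--     while len(text.split()) < target_words:
--         text += sentences[idx % len(sentences)] + " "
--         idx += 1
--     return text.strip()
-- ===== SOURCE B (Python) =====
-- def build_filler_text(target_words: int) -> str:
--     """Generate filler text of approximately `target_words` words."""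
--     sentences = [
--         'The history of artificial intelligence is a fascinating journey through decades of research and development.',
--         'Machine learning algorithms have transformed how we process and understand data across many industries.',
--         'Neural networks inspired by biological systems have become the foundation of modern deep learning approaches.',
--         'Natural language processing enables computers to understand and generate human language with increasing accuracy.',
--         'Computer vision systems can now identify objects and faces with superhuman performance in many benchmarks.',
--         'Reinforcement learning has achieved remarkable results in game playing and robotics applications worldwide.',
--         'The ethical implications of artificial intelligence deployment require careful consideration and governance frameworks.',
--         'Transfer learning allows models trained on one task to be adapted efficiently for related problems and domains.',
--         'Generative models can create realistic images text and audio that are increasingly difficult to distinguish from human work.',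
--         'Edge computing brings machine learning inference closer to data sources reducing latency and improving privacy.',
--         'Federated learning enables training models across distributed devices without centralizing sensitive personal data.',
--         'Quantum computing promises to accelerate certain machine learning algorithms exponentially in the coming decades.',
--         'Autonomous vehicles rely on a combination of sensors machine learning and real time decision making systems.',
--         'Healthcare applications of AI include medical image analysis drug discovery and personalized treatment planning.',
--         'Climate modeling and environmental monitoring benefit from advanced machine learning prediction capabilities.',
--         'Robotics and automation continue to evolve with improved perception planning and manipulation abilities.',
--         'The democratization of AI tools has made machine learning accessible to developers without specialized training.',
--         'Large language models have demonstrated emergent capabilities that were not explicitly programmed or expected.',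
--         'Data privacy regulations like GDPR impact how machine learning systems collect process and store information.',
--         'The computational costs of training large models raise questions about environmental sustainability and access.',
--     ]
--     if target_words <= 0:
--         return ""
--     counts = [len(s.split()) for s in sentences]
--     total = sum(counts)
--     full_cycles = (target_words - 1) // total
--     remainder = target_words - full_cycles * total
--     acc = 0
--     k = 0
--     while acc < remainder:
--         acc += counts[k]
--         k += 1
--     chosen = sentences * full_cycles + sentences[:k]
--     return " ".join(chosen)
-- ===== Notes on version B (the rewrite author's own statement) =====
-- stated objective: faster
-- what changed: A repeatedly appends a sentence to a growing string and re-splits the whole text to count words; B precomputes per-sentence word counts, gets the number of full cycles through the sentence list by integer division, scans once through the final partial cycle, and returns one ' '.join of the chosen sentences.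
import Mathlib
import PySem

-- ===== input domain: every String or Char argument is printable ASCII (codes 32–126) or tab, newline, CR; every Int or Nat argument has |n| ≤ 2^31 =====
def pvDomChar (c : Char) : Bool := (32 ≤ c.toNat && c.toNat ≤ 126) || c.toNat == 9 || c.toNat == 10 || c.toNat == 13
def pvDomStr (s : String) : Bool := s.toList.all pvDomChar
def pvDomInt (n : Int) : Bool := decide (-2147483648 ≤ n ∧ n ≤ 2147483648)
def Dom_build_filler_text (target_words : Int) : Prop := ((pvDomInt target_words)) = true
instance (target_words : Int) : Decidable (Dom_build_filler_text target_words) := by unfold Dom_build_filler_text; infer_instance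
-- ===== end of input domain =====

-- B replaces A's grow-string-and-resplit loop by a word-count table and cycle arithmetic
-- (precomputed per-sentence counts, integer division for full cycles, one scan of the final
-- partial cycle, then a single ' '.join); objective: faster (no repeated splitting of the
-- growing text).

-- ===== PORT A =====
def pvSentences : List String := [
    "The history of artificial intelligence is a fascinating journey through decades of research and development.",
    "Machine learning algorithms have transformed how we process and understand data across many industries.",
    "Neural networks inspired by biological systems have become the foundation of modern deep learning approaches.",
    "Natural language processing enables computers to understand and generate human language with increasing accuracy.",
    "Computer vision systems can now identify objects and faces with superhuman performance in many benchmarks.",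
    "Reinforcement learning has achieved remarkable results in game playing and robotics applications worldwide.",
    "The ethical implications of artificial intelligence deployment require careful consideration and governance frameworks.",
    "Transfer learning allows models trained on one task to be adapted efficiently for related problems and domains.",
    "Generative models can create realistic images text and audio that are increasingly difficult to distinguish from human work.",
    "Edge computing brings machine learning inference closer to data sources reducing latency and improving privacy.",
    "Federated learning enables training models across distributed devices without centralizing sensitive personal data.",
    "Quantum computing promises to accelerate certain machine learning algorithms exponentially in the coming decades.",
    "Autonomous vehicles rely on a combination of sensors machine learning and real time decision making systems.",
    "Healthcare applications of AI include medical image analysis drug discovery and personalized treatment planning.",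
    "Climate modeling and environmental monitoring benefit from advanced machine learning prediction capabilities.",
    "Robotics and automation continue to evolve with improved perception planning and manipulation abilities.",
    "The democratization of AI tools has made machine learning accessible to developers without specialized training.",
    "Large language models have demonstrated emergent capabilities that were not explicitly programmed or expected.",
    "Data privacy regulations like GDPR impact how machine learning systems collect process and store information.",
    "The computational costs of training large models raise questions about environmental sustainability and access."
  ]

-- A's while-loop: fuel-bounded recursion; fuel target_words.toNat suffices because every
-- appended sentence contains at least one word (when fuel runs out the guard is false anyway).
def pvALoop : Nat → String → Int → Int → String
  | 0, text, _, _ => text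
  | fuel + 1, text, idx, target =>
    if PySem.List.len (PySem.Str.split₀ text) < target then
      pvALoop fuel
        (text ++ PySem.List.pyGetD pvSentences (PySem.Int.mod idx (PySem.List.len pvSentences)) "" ++ " ")
        (idx + 1) target
    else text

def build_filler_text (target_words : Int) : String :=
  PySem.Str.strip (pvALoop target_words.toNat "" 0 target_words)

-- ===== PORT B =====
-- B's inner while-loop over the counts table (acc < remainder: acc += counts[k]; k += 1).
def pvBScan : List Int → Int → Int → Nat
  | [], _, _ => 0
  | c :: rest, acc, r => if acc < r then pvBScan rest (acc + c) r + 1 else 0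

def build_filler_text_alt (target_words : Int) : String :=
  if target_words ≤ 0 then "" else
  let counts := pvSentences.map (fun s => PySem.List.len (PySem.Str.split₀ s))
  let total := counts.sum
  let full_cycles := PySem.Int.floordiv (target_words - 1) total
  let remainder := target_words - full_cycles * total
  let k := pvBScan counts 0 remainder
  let chosen := (List.replicate full_cycles.toNat pvSentences).flatten ++ pvSentences.take k
  PySem.Str.join " " chosen

-- ===== PRECONDITION & SPEC =====
def Spec_build_filler_text (target_words : Int) (out : String) : Prop := out = build_filler_text_alt target_words
instance (target_words : Int) (out : String) : Decidable (Spec_build_filler_text target_words out) := by unfold Spec_build_filler_text; infer_instance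

-- ===== CLAIM (what is proved, stated in full; the proofs are below) =====
def Claim_equal_build_filler_text : Prop := ∀ (target_words : Int), Dom_build_filler_text target_words → Spec_build_filler_text target_words (build_filler_text target_words)

-- ===== LEMMAS AND PROOFS =====
-- proof-side helpers
def pvSent (i : Nat) : String := pvSentences.getD (i % 20) ""
def pvChosen (n : Nat) : List String := (List.range n).map pvSent
def pvRep (n : Nat) : List Char := ((pvChosen n).map (fun s => s.toList ++ [' '])).flatten
def pvCnt (i : Nat) : Nat := (PySem.Chars.split₀ (pvSent i).toList).length
def pvW (n : Nat) : Nat := ((List.range n).map pvCnt).sum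
def pvCountsN : List Nat := [15,14,15,14,15,13,13,17,18,15,13,14,16,14,12,13,15,14,15,14]
def pvCountsI : List Int := [15,14,15,14,15,13,13,17,18,15,13,14,16,14,12,13,15,14,15,14]
def pvGood (s : String) : Bool := !s.toList.isEmpty && !PySem.Chars.isspace s.toList.head! && !PySem.Chars.isspace s.toList.getLast!

-- split₀.go: the accumulator is prepended (reversed)
lemma pv_go_acc (b : List Char) : ∀ (cur : List Char) (acc : List (List Char)),
    PySem.Chars.split₀.go b cur acc = acc.reverse ++ PySem.Chars.split₀.go b cur [] := by
  induction b with
  | nil =>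
    intro cur acc
    by_cases h : cur.isEmpty <;> simp [PySem.Chars.split₀.go, h]
  | cons c rest ih =>
    intro cur acc
    by_cases hs : PySem.Chars.isspace c
    · by_cases hc : cur.isEmpty
      · simp only [PySem.Chars.split₀.go, hs, hc, if_true]
        exact ih [] acc
      · simp only [PySem.Chars.split₀.go, hs, hc, if_true, Bool.false_eq_true, if_false]
        rw [ih [] (cur.reverse :: acc), ih [] [cur.reverse]]
        simp
    · simp only [PySem.Chars.split₀.go, hs, Bool.false_eq_true, if_false]
      exact ih (c :: cur) acc

lemma pv_go_space (a : List Char) : ∀ (b cur : List Char) (acc : List (List Char)),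
    PySem.Chars.split₀.go (a ++ ' ' :: b) cur acc
      = PySem.Chars.split₀.go a cur acc ++ PySem.Chars.split₀.go b [] [] := by
  induction a with
  | nil =>
    intro b cur acc
    have hsp : PySem.Chars.isspace ' ' = true := by decide
    rw [List.nil_append, PySem.Chars.split₀.go.eq_2, if_pos hsp, PySem.Chars.split₀.go.eq_1]
    by_cases hc : cur.isEmpty
    · rw [if_pos hc, if_pos hc, pv_go_acc b [] acc]
    · rw [if_neg (by simp [hc]), if_neg (by simp [hc]), pv_go_acc b [] (cur.reverse :: acc)]
  | cons c a' ih =>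
    intro b cur acc
    by_cases hs : PySem.Chars.isspace c
    · by_cases hc : cur.isEmpty
      · simp only [List.cons_append, PySem.Chars.split₀.go, hs, hc, if_true]
        exact ih b [] acc
      · simp only [List.cons_append, PySem.Chars.split₀.go, hs, hc, if_true, Bool.false_eq_true, if_false]
        exact ih b [] (cur.reverse :: acc)
    · simp only [List.cons_append, PySem.Chars.split₀.go, hs, Bool.false_eq_true, if_false]
      exact ih b (c :: cur) acc

lemma pv_split_append_space (a b : List Char) :
    PySem.Chars.split₀ (a ++ ' ' :: b) = PySem.Chars.split₀ a ++ PySem.Chars.split₀ b := by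
  simp [PySem.Chars.split₀, pv_go_space]

lemma pv_split_flatten (L : List (List Char)) :
    PySem.Chars.split₀ ((L.map (fun s => s ++ [' '])).flatten) = L.flatMap PySem.Chars.split₀ := by
  induction L with
  | nil => simp [PySem.Chars.split₀, PySem.Chars.split₀.go]
  | cons s L' ih =>
    have h : (s ++ [' ']) ++ ((L'.map (fun s => s ++ [' '])).flatten)
        = s ++ ' ' :: ((L'.map (fun s => s ++ [' '])).flatten) := by simp
    simp only [List.map_cons, List.flatten_cons, h, pv_split_append_space, ih, List.flatMap_cons]

lemma pv_chosen_succ (n : Nat) : pvChosen (n + 1) = pvChosen n ++ [pvSent n] := by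
  simp [pvChosen, List.range_succ]

lemma pv_rep_succ (n : Nat) : pvRep (n + 1) = pvRep n ++ (pvSent n).toList ++ [' '] := by
  simp [pvRep, pv_chosen_succ]

lemma pv_len_split_aux : ∀ n : Nat,
    (((List.range n).map (String.toList ∘ pvSent)).flatMap PySem.Chars.split₀).length
      = ((List.range n).map pvCnt).sum := by
  intro n
  induction n with
  | zero => simp
  | succ m ih =>
    rw [List.range_succ]
    simp only [List.map_append, List.flatMap_append, List.length_append, List.sum_append]
    rw [ih]
    simp [pvCnt, Function.comp]

lemma pv_len_split_rep (n : Nat) : (PySem.Chars.split₀ (pvRep n)).length = pvW n := by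
  unfold pvRep pvW
  have h : (pvChosen n).map (fun s => s.toList ++ [' '])
      = ((pvChosen n).map String.toList).map (fun s => s ++ [' ']) := by
    rw [List.map_map]; rfl
  rw [h, pv_split_flatten]
  unfold pvChosen
  rw [List.map_map]
  exact pv_len_split_aux n

lemma pv_W_succ (n : Nat) : pvW (n + 1) = pvW n + pvCnt n := by
  simp [pvW, List.range_succ]

lemma pv_W_mono {m n : Nat} (h : m ≤ n) : pvW m ≤ pvW n := by
  induction n with
  | zero => simp_all
  | succ k ih =>
    rcases Nat.lt_or_ge m (k+1) with h' | h'
    · exact le_trans (ih (by omega)) (by rw [pv_W_succ]; omega)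
    · have : m = k + 1 := by omega
      simp [this]

set_option maxRecDepth 100000 in
set_option maxHeartbeats 2000000 in
lemma pv_counts_fact : pvSentences.map (fun s => (PySem.Chars.split₀ s.toList).length) = pvCountsN := by
  decide

lemma pv_sent_mod (i : Nat) : pvSent i = pvSent (i % 20) := by
  unfold pvSent
  rw [Nat.mod_mod_of_dvd _ (dvd_refl 20)]

lemma pv_cnt_tab (j : Nat) (h : j < 20) : pvCnt j = pvCountsN.getD j 0 := by
  have hlen : pvSentences.length = 20 := rfl
  have h2 : pvCnt j = (pvSentences.map (fun s => (PySem.Chars.split₀ s.toList).length)).getD j 0 := by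
    unfold pvCnt pvSent
    rw [Nat.mod_eq_of_lt h]
    rw [List.getD_eq_getElem?_getD, List.getD_eq_getElem?_getD, List.getElem?_map]
    rw [List.getElem?_eq_getElem (by omega)]
    simp
  rw [h2, pv_counts_fact]

lemma pv_cnt_pos (i : Nat) : 1 ≤ pvCnt i := by
  have h : i % 20 < 20 := Nat.mod_lt _ (by norm_num)
  have h2 : pvCnt i = pvCnt (i % 20) := by
    unfold pvCnt
    rw [pv_sent_mod]
  rw [h2, pv_cnt_tab (i % 20) h]
  revert h
  generalize i % 20 = j
  intro h
  interval_cases j <;> decide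

lemma pv_le_W (n : Nat) : n ≤ pvW n := by
  induction n with
  | zero => simp [pvW]
  | succ m ih => have := pv_cnt_pos m; rw [pv_W_succ]; omega

lemma pv_cnt_period (n : Nat) : pvCnt (n + 20) = pvCnt n := by
  unfold pvCnt pvSent
  rw [Nat.add_mod_right]

lemma pv_W_tab (j : Nat) (hj : j ≤ 20) : pvW j = (pvCountsN.take j).sum := by
  induction j with
  | zero => simp [pvW]
  | succ m ih =>
    have hm20 : m < 20 := by omega
    have hle : m ≤ 20 := by omega
    have hm : m < pvCountsN.length := by
      have h20 : pvCountsN.length = 20 := rfl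
      omega
    rw [pv_W_succ, ih hle, pv_cnt_tab m hm20, List.sum_take_succ _ _ hm]
    simp [List.getD_eq_getElem?_getD, List.getElem?_eq_getElem hm]

lemma pv_W_20 : pvW 20 = 289 := by
  rw [pv_W_tab 20 (le_refl _)]
  decide

lemma pv_W_period (n : Nat) : pvW (n + 20) = pvW n + 289 := by
  induction n with
  | zero => simpa [pvW] using pv_W_20
  | succ m ih =>
    have h1 : m + 1 + 20 = (m + 20) + 1 := by omega
    rw [h1, pv_W_succ, ih, pv_cnt_period, pv_W_succ]
    omega

lemma pv_W_cycle (q j : Nat) : pvW (20 * q + j) = 289 * q + pvW j := by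
  induction q with
  | zero => simp
  | succ p ih =>
    have h1 : 20 * (p + 1) + j = (20 * p + j) + 20 := by ring
    rw [h1, pv_W_period, ih]
    ring

lemma pv_W_exists (t : Int) : ∃ n : Nat, t ≤ (pvW n : Int) := by
  refine ⟨t.toNat, ?_⟩
  have := pv_le_W t.toNat
  omega

def pvNstar (t : Int) : Nat := Nat.find (pv_W_exists t)

lemma pv_nstar_spec (t : Int) : t ≤ (pvW (pvNstar t) : Int) := Nat.find_spec (pv_W_exists t)

lemma pv_nstar_le (t : Int) {n : Nat} (h : t ≤ (pvW n : Int)) : pvNstar t ≤ n :=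
  Nat.find_min' (pv_W_exists t) h

lemma pv_nstar_eq (t : Int) (n : Nat) (h1 : t ≤ (pvW n : Int))
    (h2 : ∀ m, m < n → (pvW m : Int) < t) : pvNstar t = n := by
  rcases Nat.lt_or_ge (pvNstar t) n with h | h
  · have := h2 _ h
    have := pv_nstar_spec t
    omega
  · exact le_antisymm (pv_nstar_le t h1) h

-- the A-loop reaches exactly the minimal stopping index
lemma pv_loop_inv (fuel : Nat) : ∀ (n : Nat) (t : Int), n ≤ pvNstar t → pvNstar t ≤ n + fuel →
    pvALoop fuel (String.ofList (pvRep n)) (n : Int) t = String.ofList (pvRep (pvNstar t)) := by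
  induction fuel with
  | zero =>
    intro n t h1 h2
    have h : n = pvNstar t := by omega
    simp [pvALoop, h]
  | succ f ih =>
    intro n t h1 h2
    have hcond : PySem.List.len (PySem.Str.split₀ (String.ofList (pvRep n)))
        = (pvW n : Int) := by
      rw [PySem.List.len_eq]
      unfold PySem.Str.split₀
      rw [List.length_map, String.toList_ofList, pv_len_split_rep]
    rw [pvALoop, hcond]
    by_cases hlt : (pvW n : Int) < t
    · have hn : n < pvNstar t := by
        rcases Nat.lt_or_ge n (pvNstar t) with h | h
        · exact h
        · have := pv_nstar_spec t
          have := pv_W_mono h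
          omega
      rw [if_pos hlt]
      have hstep : String.ofList (pvRep n)
            ++ PySem.List.pyGetD pvSentences (PySem.Int.mod (n : Int) (PySem.List.len pvSentences)) ""
            ++ " " = String.ofList (pvRep (n + 1)) := by
        apply String.toList_inj.mp
        have hlen20 : PySem.List.len pvSentences = ((20 : Nat) : Int) := by decide
        rw [hlen20, PySem.Int.mod_natCast, PySem.List.pyGetD_natCast]
        simp [pv_rep_succ, pvSent]
      rw [hstep]
      have hcast : ((n : Int) + 1) = ((n + 1 : Nat) : Int) := by push_cast; ring
      rw [hcast]
      exact ih (n + 1) t hn (by omega)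
    · rw [if_neg hlt]
      have h3 : pvNstar t ≤ n := pv_nstar_le t (by omega)
      have h4 : n = pvNstar t := by omega
      rw [h4]

-- B-side facts
set_option maxRecDepth 100000 in
set_option maxHeartbeats 2000000 in
lemma pv_scan_table : ∀ j ∈ List.range 289,
    pvBScan pvCountsI 0 ((j + 1 : Nat) : Int) ≤ 20
      ∧ 1 ≤ pvBScan pvCountsI 0 ((j + 1 : Nat) : Int)
      ∧ j + 1 ≤ (pvCountsN.take (pvBScan pvCountsI 0 ((j + 1 : Nat) : Int))).sum
      ∧ (pvCountsN.take (pvBScan pvCountsI 0 ((j + 1 : Nat) : Int) - 1)).sum < j + 1 := by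
  decide

lemma pv_chosen_take (k : Nat) (hk : k ≤ 20) : pvChosen k = pvSentences.take k := by
  have hlen : pvSentences.length = 20 := rfl
  apply List.ext_getElem
  · simp [pvChosen, hlen]; omega
  · intro i h1 h2
    simp only [pvChosen, List.getElem_map, List.getElem_range, List.getElem_take]
    have hi : i < k := by simpa [pvChosen] using h1
    unfold pvSent
    rw [Nat.mod_eq_of_lt (by omega)]
    rw [List.getD_eq_getElem?_getD, List.getElem?_eq_getElem (by omega)]
    simp

lemma pv_chosen_add_20 (m : Nat) : pvChosen (20 + m) = pvSentences ++ pvChosen m := by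
  unfold pvChosen
  rw [List.range_add, List.map_append, List.map_map]
  have h1 : (List.range 20).map pvSent = pvSentences := by
    have h := pv_chosen_take 20 (le_refl 20)
    unfold pvChosen at h
    rw [h]
    rfl
  have h2 : (List.range m).map (pvSent ∘ fun x => 20 + x) = (List.range m).map pvSent := by
    apply List.map_congr_left
    intro i _
    simp only [Function.comp]
    unfold pvSent
    congr 1
    omega
  rw [h1, h2]

lemma pv_chosen_decomp (q k : Nat) (hk : k ≤ 20) :
    pvChosen (20 * q + k) = (List.replicate q pvSentences).flatten ++ pvSentences.take k := by
  induction q with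
  | zero => simpa using pv_chosen_take k hk
  | succ p ih =>
    have h1 : 20 * (p + 1) + k = 20 + (20 * p + k) := by ring
    rw [h1, pv_chosen_add_20, ih]
    simp [List.replicate_succ]

-- join/strip facts
lemma pv_flat_eq_join (L : List String) (hne : L ≠ []) :
    ((L.map (fun s => s.toList ++ [' '])).flatten)
      = PySem.Chars.join [' '] (L.map String.toList) ++ [' '] := by
  induction L with
  | nil => simp at hne
  | cons s L' ih =>
    cases L' with
    | nil => simp [PySem.Chars.join_singleton]
    | cons t L'' =>
      rw [List.map_cons, List.flatten_cons, ih (by simp)]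
      simp only [List.map_cons]
      rw [PySem.Chars.join_cons_cons]
      simp

lemma pv_join_head (L : List String) (hne : L ≠ []) (hg : ∀ s ∈ L, pvGood s = true) :
    ∃ c cs, PySem.Chars.join [' '] (L.map String.toList) = c :: cs ∧ PySem.Chars.isspace c = false := by
  cases L with
  | nil => simp at hne
  | cons s L' =>
    have hgs := hg s (by simp)
    unfold pvGood at hgs
    simp only [Bool.and_eq_true, Bool.not_eq_true'] at hgs
    obtain ⟨⟨hne', hhead⟩, _⟩ := hgs
    obtain ⟨c, cs, hcs⟩ : ∃ c cs, s.toList = c :: cs := by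
      cases h : s.toList with
      | nil => rw [h] at hne'; simp at hne'
      | cons c cs => exact ⟨c, cs, rfl⟩
    have hc : PySem.Chars.isspace c = false := by
      rw [hcs] at hhead
      simpa using hhead
    cases L' with
    | nil =>
      exact ⟨c, cs, by simp [PySem.Chars.join_singleton, hcs], hc⟩
    | cons t L'' =>
      refine ⟨c, cs ++ ' ' :: PySem.Chars.join [' '] (t.toList :: L''.map String.toList), ?_, hc⟩
      rw [List.map_cons, List.map_cons, PySem.Chars.join_cons_cons, hcs]
      simp

lemma pv_join_last (L : List String) (hne : L ≠ []) (hg : ∀ s ∈ L, pvGood s = true) :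
    ∃ c cs, (PySem.Chars.join [' '] (L.map String.toList)).reverse = c :: cs
      ∧ PySem.Chars.isspace c = false := by
  induction L with
  | nil => simp at hne
  | cons s L' ih =>
    cases L' with
    | nil =>
      have hgs := hg s (by simp)
      unfold pvGood at hgs
      simp only [Bool.and_eq_true, Bool.not_eq_true'] at hgs
      obtain ⟨⟨hne', _⟩, hlast⟩ := hgs
      obtain ⟨c, cs, hcs⟩ : ∃ c cs, s.toList.reverse = c :: cs := by
        cases h : s.toList.reverse with
        | nil =>
          exfalso
          have h2 : s.toList = [] := by simpa using congrArg List.reverse h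
          rw [h2] at hne'
          simp at hne'
        | cons c cs => exact ⟨c, cs, rfl⟩
      refine ⟨c, cs, ?_, ?_⟩
      · simp [PySem.Chars.join_singleton, hcs]
      · have heq : s.toList.getLast! = c := by
          have h1 : s.toList = (c :: cs).reverse := by
            have := congrArg List.reverse hcs
            simpa using this
          rw [h1, List.getLast!_eq_getLast?_getD]
          simp
        rw [heq] at hlast
        simpa using hlast
    | cons t L'' =>
      obtain ⟨c, cs, hcs, hc⟩ := ih (by simp) (fun x hx => hg x (by simp [hx]))
      refine ⟨c, cs ++ (' ' :: s.toList.reverse), ?_, hc⟩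
      rw [List.map_cons, List.map_cons, PySem.Chars.join_cons_cons]
      rw [List.map_cons] at hcs
      simp [hcs]

lemma pv_strip_flatten (L : List String) (hne : L ≠ []) (hg : ∀ s ∈ L, pvGood s = true) :
    PySem.Chars.strip ((L.map (fun s => s.toList ++ [' '])).flatten)
      = PySem.Chars.join [' '] (L.map String.toList) := by
  rw [pv_flat_eq_join L hne]
  obtain ⟨c, cs, hcons, hc⟩ := pv_join_head L hne hg
  obtain ⟨d, ds, hrcons, hd⟩ := pv_join_last L hne hg
  unfold PySem.Chars.strip PySem.Chars.lstrip PySem.Chars.rstrip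
  rw [List.dropWhile_append]
  rw [hcons]
  rw [List.dropWhile_cons_of_neg (by simp [hc])]
  simp only [List.isEmpty_cons, if_false, Bool.false_eq_true]
  rw [← hcons]
  rw [List.reverse_append]
  simp only [List.reverse_cons, List.reverse_nil, List.nil_append, List.singleton_append]
  rw [List.dropWhile_cons_of_pos (by decide)]
  rw [hrcons, List.dropWhile_cons_of_neg (by simp [hd]), ← hrcons]
  simp

set_option maxRecDepth 100000 in
set_option maxHeartbeats 2000000 in
lemma pv_good_sentences : ∀ s ∈ pvSentences, pvGood s = true := by decide

lemma pv_good_chosen (n : Nat) : ∀ s ∈ pvChosen n, pvGood s = true := by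
  intro s hs
  unfold pvChosen at hs
  obtain ⟨i, _, rfl⟩ := List.mem_map.mp hs
  apply pv_good_sentences
  unfold pvSent
  have h : i % 20 < 20 := Nat.mod_lt _ (by norm_num)
  have hlen : pvSentences.length = 20 := rfl
  rw [List.getD_eq_getElem?_getD, List.getElem?_eq_getElem (by omega)]
  simp

-- ===== VERDICT (by name: the statement is the Claim_ definition above) =====
theorem build_filler_text_spec : Claim_equal_build_filler_text := by
  intro t _
  unfold Spec_build_filler_text build_filler_text
  by_cases ht : t ≤ 0
  · have h0 : t.toNat = 0 := by omega
    rw [h0]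
    unfold build_filler_text_alt
    rw [if_pos ht]
    have h1 : pvALoop 0 "" 0 t = "" := rfl
    rw [h1]
    decide
  · have hstart : ("" : String) = String.ofList (pvRep 0) := by decide
    have hA : pvALoop t.toNat "" 0 t = String.ofList (pvRep (pvNstar t)) := by
      rw [hstart]
      have h0 : ((0 : Nat) : Int) = (0 : Int) := by norm_num
      rw [← h0]
      have h00 : pvNstar t ≤ 0 + t.toNat := by
        have h01 : 0 + t.toNat = t.toNat := by omega
        rw [h01]
        apply pv_nstar_le
        have := pv_le_W t.toNat
        omega
      exact pv_loop_inv t.toNat 0 t (by omega) h00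
    rw [hA]
    -- strip through ofList
    have hts : PySem.Str.strip (String.ofList (pvRep (pvNstar t)))
        = String.ofList (PySem.Chars.strip (pvRep (pvNstar t))) := by
      unfold PySem.Str.strip
      rw [String.toList_ofList]
    rw [hts]
    -- B's counts table is the literal table
    have hcounts : pvSentences.map (fun s => PySem.List.len (PySem.Str.split₀ s)) = pvCountsI := by
      have h1 : (fun s : String => PySem.List.len (PySem.Str.split₀ s))
          = (fun n : Nat => (n : Int)) ∘ (fun s : String => (PySem.Chars.split₀ s.toList).length) := by
        funext s
        simp only [Function.comp]
        rw [PySem.List.len_eq]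
        unfold PySem.Str.split₀
        rw [List.length_map]
      rw [h1, ← List.map_map, pv_counts_fact]
      decide
    have hsum : pvCountsI.sum = (289 : Int) := by decide
    unfold build_filler_text_alt
    rw [if_neg (by omega)]
    simp only [hcounts, hsum]
    -- arithmetic on the cycle count
    set q : Int := PySem.Int.floordiv (t - 1) 289 with hqdef
    have hq0 : 0 ≤ q := by
      rw [hqdef, PySem.Int.floordiv_eq_ediv_of_pos (by norm_num)]
      exact Int.ediv_nonneg (by omega) (by norm_num)
    have hbr : q * 289 ≤ t - 1 ∧ t - 1 < (q + 1) * 289 :=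
      (PySem.Int.floordiv_eq_iff_of_pos (by norm_num)).mp hqdef.symm
    set Q : Nat := q.toNat with hQdef
    have hqQ : q = (Q : Int) := by omega
    set r : Int := t - q * 289 with hrdef
    have hr1 : 1 ≤ r := by omega
    have hr289 : r ≤ 289 := by nlinarith [hbr.2]
    set rn : Nat := r.toNat with hrndef
    have hrn : r = (rn : Int) := by omega
    have hrn1 : 1 ≤ rn := by omega
    have hrn289 : rn ≤ 289 := by omega
    -- scan facts
    have hscan := pv_scan_table (rn - 1) (by
      rw [List.mem_range]
      omega)
    rw [show rn - 1 + 1 = rn from by omega] at hscan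
    set k : Nat := pvBScan pvCountsI 0 ((rn : Nat) : Int) with hkdef
    obtain ⟨hk20, hk1, hub, hlb⟩ := hscan
    -- the stopping index
    have hWk : pvW k = (pvCountsN.take k).sum := pv_W_tab k hk20
    have hWk1 : pvW (k - 1) = (pvCountsN.take (k - 1)).sum := pv_W_tab (k - 1) (by omega)
    have hn : pvNstar t = 20 * Q + k := by
      apply pv_nstar_eq
      · rw [pv_W_cycle]
        have h1 : rn ≤ pvW k := by rw [hWk]; exact hub
        push_cast
        omega
      · intro m hm
        have h2 : pvW (k - 1) < rn := by rw [hWk1]; exact hlb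
        have hmono : pvW m ≤ pvW (20 * Q + (k - 1)) := pv_W_mono (by omega)
        rw [pv_W_cycle] at hmono
        have h3 : ((pvW m : Int)) ≤ 289 * (Q : Int) + ((pvW (k - 1) : Nat) : Int) := by
          exact_mod_cast hmono
        omega
    rw [hn]
    -- both sides are the space-join of the same sentence list
    have hchosen := pv_chosen_decomp Q k hk20
    have hne : pvChosen (20 * Q + k) ≠ [] := by
      unfold pvChosen
      simp only [ne_eq, List.map_eq_nil_iff, List.range_eq_nil]
      omega
    have hstrip := pv_strip_flatten (pvChosen (20 * Q + k)) hne (pv_good_chosen _)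
    unfold pvRep
    rw [hstrip]
    unfold PySem.Str.join
    rw [show (" " : String).toList = [' '] from rfl]
    rw [show pvBScan pvCountsI 0 r = k from by rw [hrn], hchosen]
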